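-- pv_equiv track=rewrite | github.com/jorgefalconcampos/tsp-hc | main.py | obtenerMejorVecino
-- ===== SOURCE A (Python) =====
-- def longRuta(tsp, solution):
--     longRuta = 0
--     for i in range(len(solution)):
--         longRuta += tsp[solution[i - 1]][solution[i]]
--     return longRuta
--
-- def obtenerMejorVecino(tsp, vecinos):
--     mejorLongitudDeRuta = longRuta(tsp, vecinos[0])
--     mejorVecino = vecinos[0]
--     for vecino in vecinos:
--         actualLongitudDeRuta = longRuta(tsp, vecino)
--         if actualLongitudDeRuta < mejorLongitudDeRuta:
--             mejorLongitudDeRuta = actualLongitudDeRuta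
--             mejorVecino = vecino
--     return mejorVecino, mejorLongitudDeRuta
-- ===== SOURCE B (Python) =====
-- # B: sort-then-pick instead of a running-best scan: stable-sort the tours by their
-- # circular route length (consecutive-pair zip instead of index arithmetic) and take
-- # the head; stability makes the head the FIRST tour of minimal length, like A.
-- def obtenerMejorVecino(tsp, vecinos):
--     def coste(v):
--         return sum(tsp[a][b] for a, b in zip(v, v[1:] + v[:1]))
--     orden = sorted(vecinos, key=coste)
--     mejor = orden[0]
--     return mejor, coste(mejor)
-- ===== Notes on version B (the rewrite author's own statement) =====
-- stated objective: alternative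
-- what changed: B replaces A's interleaved running-best scan with sort-then-pick: it stable-sorts the tours by their circular route length (computed over consecutive pairs zip(v, v[1:]+v[:1]) instead of index arithmetic) and returns the head of the sorted list, whose stability yields the same first-minimal tour.
import Mathlib
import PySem

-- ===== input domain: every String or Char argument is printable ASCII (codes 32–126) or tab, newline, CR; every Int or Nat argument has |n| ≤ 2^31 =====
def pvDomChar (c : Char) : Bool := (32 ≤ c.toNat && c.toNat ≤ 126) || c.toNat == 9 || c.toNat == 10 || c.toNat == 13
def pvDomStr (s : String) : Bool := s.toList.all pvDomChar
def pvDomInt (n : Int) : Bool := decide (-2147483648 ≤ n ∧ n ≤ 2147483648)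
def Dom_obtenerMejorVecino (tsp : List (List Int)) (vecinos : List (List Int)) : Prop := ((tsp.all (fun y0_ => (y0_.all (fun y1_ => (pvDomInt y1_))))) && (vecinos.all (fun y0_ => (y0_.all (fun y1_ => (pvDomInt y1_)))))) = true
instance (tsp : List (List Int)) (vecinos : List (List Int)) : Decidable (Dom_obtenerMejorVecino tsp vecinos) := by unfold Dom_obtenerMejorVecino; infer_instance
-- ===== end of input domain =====

-- B replaces A's interleaved running-best scan with sort-then-pick: stable-sort the
-- tours by circular route length (consecutive-pair zip instead of index arithmetic)
-- and take the head; stability makes it the first minimal tour. Objective: alternative.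

-- ===== PORT A =====
-- longRuta: sums tsp[solution[i-1]][solution[i]] over i in range(len(solution)).
def pvLongRuta (tsp : List (List Int)) (solution : List Int) : Int :=
  (PySem.List.pyRange 0 (PySem.List.len solution) 1).foldl
    (fun acc i =>
      acc + PySem.List.pyGetD
              (PySem.List.pyGetD tsp (PySem.List.pyGetD solution (i - 1) 0) [])
              (PySem.List.pyGetD solution i 0) 0) 0

def obtenerMejorVecino (tsp : List (List Int)) (vecinos : List (List Int)) : List Int × Int :=
  let mejorLongitudDeRuta := pvLongRuta tsp (PySem.List.pyGetD vecinos 0 [])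
  let mejorVecino := PySem.List.pyGetD vecinos 0 []
  let r := vecinos.foldl
    (fun st vecino =>
      let actualLongitudDeRuta := pvLongRuta tsp vecino
      if actualLongitudDeRuta < st.2 then (vecino, actualLongitudDeRuta) else st)
    (mejorVecino, mejorLongitudDeRuta)
  r

-- ===== PORT B =====
-- coste(v): route length over the consecutive pair list zip(v, v[1:] + v[:1])
def pvCoste (tsp : List (List Int)) (v : List Int) : Int :=
  ((v.zip (PySem.List.slice v (some 1) none ++ PySem.List.slice v none (some 1))).map
    (fun p => PySem.List.pyGetD (PySem.List.pyGetD tsp p.1 []) p.2 0)).sum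

def obtenerMejorVecino_alt (tsp : List (List Int)) (vecinos : List (List Int)) : List Int × Int :=
  let orden := PySem.List.sorted vecinos (fun v => pvCoste tsp v)
  match orden with
  | [] => ([], 0)   -- unreachable under Pre_: Python's orden[0] raises IndexError here
  | mejor :: _ => (mejor, pvCoste tsp mejor)

-- ===== PRECONDITION & SPEC =====
-- Pre_: exactly where Python A returns: vecinos is nonempty (else vecinos[0] raises
-- IndexError) and every circular pair (v[i-1], v[i]) of every vecino indexes tsp and
-- the selected row in range (else tsp[...][...] raises IndexError).
def Pre_obtenerMejorVecino (tsp : List (List Int)) (vecinos : List (List Int)) : Prop :=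
  vecinos ≠ [] ∧ ∀ v ∈ vecinos,
    ∀ p ∈ (v.drop (v.length - 1) ++ v.dropLast).zip v,
      PySem.Raise.InRange tsp.length p.1 ∧
      PySem.Raise.InRange (PySem.List.pyGetD tsp p.1 []).length p.2
instance (tsp : List (List Int)) (vecinos : List (List Int)) : Decidable (Pre_obtenerMejorVecino tsp vecinos) := by unfold Pre_obtenerMejorVecino; infer_instance

def pvWitness_obtenerMejorVecino : List (List Int) × List (List Int) :=
  ([[0, 5], [3, 0]], [[0, 1], [1, 0], []])

def Spec_obtenerMejorVecino (tsp : List (List Int)) (vecinos : List (List Int)) (out : List Int × Int) : Prop := out = obtenerMejorVecino_alt tsp vecinos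
instance (tsp : List (List Int)) (vecinos : List (List Int)) (out : List Int × Int) : Decidable (Spec_obtenerMejorVecino tsp vecinos out) := by unfold Spec_obtenerMejorVecino; infer_instance

-- ===== CLAIM (what is proved, stated in full; the proofs are below) =====
def Claim_equal_obtenerMejorVecino : Prop := ∀ (tsp : List (List Int)) (vecinos : List (List Int)), Dom_obtenerMejorVecino tsp vecinos → Pre_obtenerMejorVecino tsp vecinos → Spec_obtenerMejorVecino tsp vecinos (obtenerMejorVecino tsp vecinos)

-- ===== LEMMAS AND PROOFS =====

-- proof-side helper: A's running-best scan, wrap-around-pair order (previous B shape)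
def pvLongOld (tsp : List (List Int)) (v : List Int) : Int :=
  (((PySem.List.slice v (some (-1)) none ++ PySem.List.slice v none (some (-1))).zip v).map
    (fun p => PySem.List.pyGetD (PySem.List.pyGetD tsp p.1 []) p.2 0)).sum

-- A's index-arithmetic loop equals the wrap-around-pair sum.
theorem pvLong_eq_old (tsp : List (List Int)) (v : List Int) :
    pvLongRuta tsp v = pvLongOld tsp v := by
  unfold pvLongRuta pvLongOld
  rw [PySem.List.foldl_add, zero_add, PySem.List.slice_from_neg_one,
      PySem.List.slice_to_neg_one]
  apply congrArg List.sum
  have hrot : (List.drop (v.length - 1) v ++ v.dropLast).length = v.length := by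
    simp [List.length_dropLast]
  apply List.ext_getElem
  · simp [PySem.List.length_pyRange_one, List.length_zip, List.length_dropLast]
  · intro k h1 h2
    have hk : k < v.length := by
      simpa [PySem.List.length_pyRange_one, PySem.List.len] using h1
    have hn : 0 < v.length := by omega
    simp only [List.getElem_map, PySem.List.getElem_pyRange_one, List.getElem_zip]
    have hgd2 : PySem.List.pyGetD v ((0:Int) + (k:Int)) 0 = v[k] := by
      rw [zero_add, PySem.List.pyGetD_natCast, List.getD_eq_getElem _ _ hk]
    rcases Nat.eq_zero_or_pos k with rfl | hkpos
    · have hne : v ≠ [] := List.ne_nil_of_length_pos hn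
      have hfst : (List.drop (v.length - 1) v ++ v.dropLast)[0]'(by omega)
          = v[v.length - 1]'(by omega) := by
        rw [List.getElem_append_left (by simp [List.length_drop]; omega)]
        simp
      have hgd1 : PySem.List.pyGetD v ((0:Int) + (0:Nat) - 1) 0 = v[v.length - 1]'(by omega) := by
        have h0 : ((0:Int) + (0:Nat) - 1) = -1 := by norm_num
        rw [h0, PySem.List.pyGetD_neg_one v 0 hne, List.getLast_eq_getElem]
      rw [hfst, hgd1, hgd2]
    · have hfst : (List.drop (v.length - 1) v ++ v.dropLast)[k]'(by omega)
          = v[k - 1]'(by omega) := by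
        rw [List.getElem_append_right (by simp [List.length_drop]; omega)]
        rw [List.getElem_dropLast]
        congr 1
        simp [List.length_drop]; omega
      have hgd1 : PySem.List.pyGetD v ((0:Int) + (k:Int) - 1) 0 = v[k - 1]'(by omega) := by
        have h0 : ((0:Int) + (k:Int) - 1) = ((k - 1 : Nat) : Int) := by omega
        rw [h0, PySem.List.pyGetD_natCast, List.getD_eq_getElem _ _ (by omega)]
      rw [hfst, hgd1, hgd2]

-- edge-list rotation: v.zip(tail++[c]) is dropLast.zip tail plus the wrap pair at the end
theorem pvZipRot (t : List Int) : ∀ (a c : Int),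
    (a :: t).zip (t ++ [c]) = ((a :: t).dropLast.zip t) ++ [((a :: t).getLastD c, c)] := by
  induction t with
  | nil => intro a c; simp
  | cons b t ih =>
      intro a c
      simp only [List.cons_append, List.zip_cons_cons, ih b c]
      simp

theorem pvZipOld (t : List Int) (a x : Int) :
    ((x :: (a :: t).dropLast)).zip (a :: t) = (x, a) :: ((a :: t).dropLast.zip t) := by
  simp [List.zip_cons_cons]

theorem pvDropRot (t : List Int) : ∀ (a c : Int),
    (a :: t).drop t.length = [(a :: t).getLastD c] := by
  induction t with
  | nil => intro a c; simp
  | cons b t ih =>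
      intro a c
      have h : (a :: b :: t).drop (b :: t).length = (b :: t).drop t.length := by simp
      rw [h, ih b c]
      simp

-- The wrap-around-pair sum equals B's consecutive-pair sum (a rotation of the edges).
theorem pvLong_eq_coste (tsp : List (List Int)) (v : List Int) :
    pvLongOld tsp v = pvCoste tsp v := by
  unfold pvLongOld pvCoste
  rcases v with - | ⟨a, t⟩
  · simp [PySem.List.slice]
  rw [PySem.List.slice_from_neg_one, PySem.List.slice_to_neg_one,
      PySem.List.slice_from_one, PySem.List.slice_to _ (by norm_num : (0:Int) ≤ 1)]
  simp only [List.tail_cons, Int.toNat_one, List.take_succ_cons, List.take_zero]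
  rw [show (a :: t).length - 1 = t.length from by simp, pvDropRot t a a,
      List.singleton_append, pvZipOld, pvZipRot t a a,
      List.map_cons, List.sum_cons, List.map_append, List.sum_append,
      List.map_singleton, List.sum_singleton]
  ring

-- proof-side recursion mirroring A's running-best fold (first component only)
def pvPick (f : List Int → Int) (b : List Int) : List (List Int) → List Int
  | [] => b
  | x :: l => pvPick f (if f x < f b then x else b) l

theorem foldl_pick (f : List Int → Int) (l : List (List Int)) (b : List Int) :
    l.foldl (fun st x => if f x < st.2 then (x, f x) else st) (b, f b)
      = (pvPick f b l, f (pvPick f b l)) := by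
  induction l generalizing b with
  | nil => rfl
  | cons x l ih =>
      simp only [List.foldl_cons, pvPick]
      by_cases h : f x < f b <;> simp [h, ih]

-- head of the stable insertion sort = A's running strict-< minimum
theorem foldl_insertBy_head (f : List Int → Int) (l : List (List Int))
    (m : List Int) (t : List (List Int)) :
    ∃ t', l.foldl
        (fun acc x => PySem.List.insertBy (fun a b => decide (f a < f b)) x acc)
        (m :: t) = pvPick f m l :: t' := by
  induction l generalizing m t with
  | nil => exact ⟨t, rfl⟩
  | cons x l ih =>
      simp only [List.foldl_cons, pvPick]
      by_cases h : f x < f m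
      · have hins : PySem.List.insertBy (fun a b => decide (f a < f b)) x (m :: t)
            = x :: m :: t := by simp [PySem.List.insertBy, h]
        rw [hins, if_pos h]
        exact ih x (m :: t)
      · have hins : PySem.List.insertBy (fun a b => decide (f a < f b)) x (m :: t)
            = m :: PySem.List.insertBy (fun a b => decide (f a < f b)) x t := by
          simp [PySem.List.insertBy, h]
        rw [hins, if_neg h]
        exact ih m _

theorem sorted_head (f : List Int → Int) (v0 : List Int) (rest : List (List Int)) :
    ∃ t', PySem.List.sorted (v0 :: rest) f = pvPick f v0 rest :: t' := by
  rw [PySem.List.sorted_eq_foldl_insertBy]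
  simp only [List.foldl_cons]
  have h0 : PySem.List.insertBy (fun a b => decide (f a < f b)) v0 [] = [v0] := by
    simp [PySem.List.insertBy]
  rw [h0]
  exact foldl_insertBy_head f rest v0 []

-- ===== VERDICT (by name: the statement is the Claim_ definition above) =====
theorem obtenerMejorVecino_spec : Claim_equal_obtenerMejorVecino := by
  intro tsp vecinos hdom hpre
  obtain ⟨hne, -⟩ := hpre
  rcases vecinos with - | ⟨v0, rest⟩
  · exact absurd rfl hne
  unfold Spec_obtenerMejorVecino obtenerMejorVecino obtenerMejorVecino_alt
  simp only [PySem.List.pyGetD_zero_cons, List.foldl_cons, ite_self]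
  rw [foldl_pick (pvLongRuta tsp) rest v0]
  have hf : pvLongRuta tsp = pvCoste tsp :=
    funext (fun v => (pvLong_eq_old tsp v).trans (pvLong_eq_coste tsp v))
  rw [hf]
  obtain ⟨t', hsort⟩ := sorted_head (pvCoste tsp) v0 rest
  rw [hsort]
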